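-- pv_equiv track=rewrite | github.com/humancipher/Programming_Contest | Programming_Contest/AtCoder/ARC/ARC_110-119/ARC_113/ARC_113_C.py | solve
-- ===== SOURCE A (Python) =====
-- def solve(S,N):
--     ans = 0
--     bef_alf = "" #直前でbef_alfに書き換えた
--     bef_pt = N
--     for i in reversed(range(N-2)):
--         if S[i] == S[i+1]:
--             T = S[i+2:bef_pt]
--             tmp = len(T) - T.count(S[i])
--             if S[i] != bef_alf:
--                 tmp += N - bef_pt
--             ans += tmp
--             bef_alf = S[i]
--             bef_pt = i
--     return ans
-- ===== SOURCE B (Python) =====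
-- def solve(S, N):
--     # prefix counts: pref[j] maps each char to its number of occurrences in S[:j]
--     pref = [{}]
--     cur = {}
--     for ch in S:
--         cur = dict(cur)
--         cur[ch] = cur.get(ch, 0) + 1
--         pref.append(cur)
--     hits = [i for i in range(N - 2) if S[i] == S[i + 1]]
--     ans = 0
--     for i, nxt in zip(hits, hits[1:] + [None]):
--         bef_pt = N if nxt is None else nxt
--         c = S[i]
--         tmp = 0
--         if i + 2 < bef_pt:
--             tmp = (bef_pt - (i + 2)) - (pref[bef_pt].get(c, 0) - pref[i + 2].get(c, 0))
--         if nxt is None or S[nxt] != c: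
--             tmp += N - bef_pt
--         ans += tmp
--     return ans
-- ===== Notes on version B (the rewrite author's own statement) =====
-- stated objective: alternative
-- what changed: A's reversed stateful scan that slices the string and counts inside the slice at each rewrite point is replaced by a precomputed prefix-count table (a list of dicts built in one pass) plus a stateless forward pass over the ascending list of rewrite points, each paired with its successor via zip, doing pure table arithmetic instead of slicing.
-- outside the precondition, e.g. on solve('aab', 4): A returns 1, B raises IndexError
import Mathlib
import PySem

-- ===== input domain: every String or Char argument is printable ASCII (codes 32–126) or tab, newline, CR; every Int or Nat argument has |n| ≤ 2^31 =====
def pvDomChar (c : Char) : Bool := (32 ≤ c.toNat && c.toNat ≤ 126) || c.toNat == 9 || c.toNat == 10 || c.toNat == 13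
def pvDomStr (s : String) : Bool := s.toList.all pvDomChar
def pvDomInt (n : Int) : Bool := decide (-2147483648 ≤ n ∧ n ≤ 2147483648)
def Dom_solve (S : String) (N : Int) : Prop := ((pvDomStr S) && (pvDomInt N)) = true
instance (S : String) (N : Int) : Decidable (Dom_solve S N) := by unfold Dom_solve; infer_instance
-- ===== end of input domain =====

-- B replaces A's reversed stateful scan (slice + count per rewrite point) by a prefix-count
-- table (a list of dicts) and a stateless pass over the ascending rewrite points paired with
-- their successors (objective: alternative).

-- ===== PORT A =====
-- one iteration of A's 'for i in reversed(range(N-2))' loop; state = (ans, bef_alf, bef_pt);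
-- bef_alf = "" is ported as none, bef_alf = S[i] as some c (1-char strings compare as chars)
def solveStepA (cs : List Char) (N : Int) (st : Int × Option Char × Int) (i : Int) :
    Int × Option Char × Int :=
  match st with
  | (ans, befAlf, befPt) =>
    match PySem.List.pyGet? cs i, PySem.List.pyGet? cs (i + 1) with
    | some c, some c2 =>
      if c = c2 then
        let T := PySem.List.slice cs (some (i + 2)) (some befPt)
        let tmp : Int := (T.length : Int) - (PySem.List.count T c : Int)
        let tmp := if some c ≠ befAlf then tmp + (N - befPt) else tmp
        (ans + tmp, some c, i)
      else (ans, befAlf, befPt)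
    | _, _ => (ans, befAlf, befPt)   -- S[i]/S[i+1] IndexError: excluded by Pre_solve

def solve (S : String) (N : Int) : Int :=
  (((PySem.List.pyRange 0 (N - 2) 1).reverse).foldl (solveStepA S.toList N) (0, none, N)).1

-- ===== PORT B =====
-- prefix-count table: pref[j] holds the multiplicity of each char in S[:j]  (Source B's first loop)
def solveAltPrefStep (p : List (PySem.Dict Char Int) × PySem.Dict Char Int) (ch : Char) :
    List (PySem.Dict Char Int) × PySem.Dict Char Int :=
  let cur := p.2.insert ch (p.2.getD ch 0 + 1)
  (p.1 ++ [cur], cur)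

def solveAltPref (cs : List Char) : List (PySem.Dict Char Int) :=
  (cs.foldl solveAltPrefStep ([PySem.Dict.empty], PySem.Dict.empty)).1

-- the hit filter: [i for i in range(N-2) if S[i] == S[i+1]]
def solveAltHit (cs : List Char) (i : Int) : Bool :=
  match PySem.List.pyGet? cs i, PySem.List.pyGet? cs (i + 1) with
  | some c, some c2 => c = c2
  | _, _ => false

-- body of Source B's 'for i, nxt in zip(hits, hits[1:] + [None])' loop
def solveAltStep (cs : List Char) (N : Int) (pref : List (PySem.Dict Char Int))
    (ans : Int) (pr : Int × Option Int) : Int :=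
  match pr with
  | (i, nxt) =>
    let befPt : Int := match nxt with | none => N | some j => j
    match PySem.List.pyGet? cs i with
    | none => ans              -- S[i] IndexError: excluded by Pre_solve
    | some c =>
      let tmp : Int :=
        if i + 2 < befPt then
          (befPt - (i + 2)) -
            (((PySem.List.pyGet? pref befPt).getD PySem.Dict.empty).getD c 0 -
             ((PySem.List.pyGet? pref (i + 2)).getD PySem.Dict.empty).getD c 0)
        else 0
      let tmp : Int :=
        match nxt with
        | none => tmp + (N - befPt)
        | some j =>
          match PySem.List.pyGet? cs j with
          | some cj => if cj ≠ c then tmp + (N - befPt) else tmp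
          | none => tmp      -- S[nxt] IndexError: unreachable (nxt is a hit index)
      ans + tmp

def solve_alt (S : String) (N : Int) : Int :=
  let cs := S.toList
  let pref := solveAltPref cs
  let hits := (PySem.List.pyRange 0 (N - 2) 1).filter (solveAltHit cs)
  (hits.zip ((hits.drop 1).map Option.some ++ [Option.none])).foldl
    (solveAltStep cs N pref) 0

-- ===== PRECONDITION & SPEC =====
-- Pre_solve excludes N > len(S): for N ≥ len(S)+2 (with N ≥ 3) A raises IndexError on S[i],
-- and at N = len(S)+1 A returns only because its slice S[i+2:N] silently clamps past the end
-- of the string (there B's prefix table has no row N and B itself raises IndexError).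
def Pre_solve (S : String) (N : Int) : Prop := N ≤ (S.toList.length : Int) ∨ N ≤ 2
instance (S : String) (N : Int) : Decidable (Pre_solve S N) := by unfold Pre_solve; infer_instance

def pvWitness_solve : String × Int := ("aab", 3)

def Spec_solve (S : String) (N : Int) (out : Int) : Prop := out = solve_alt S N
instance (S : String) (N : Int) (out : Int) : Decidable (Spec_solve S N out) := by
  unfold Spec_solve; infer_instance

-- ===== CLAIM (what is proved, stated in full; the proofs are below) =====
def Claim_equal_solve : Prop :=
  ∀ (S : String) (N : Int), Dom_solve S N → Pre_solve S N → Spec_solve S N (solve S N)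

-- ===== LEMMAS AND PROOFS =====

-- recursive value of Source B's main loop over a hit list (each hit paired with its successor)
def solveAltSum (cs : List Char) (N : Int) (pref : List (PySem.Dict Char Int)) :
    List Int → Int
  | [] => 0
  | i :: rest => solveAltStep cs N pref 0 (i, rest.head?) + solveAltSum cs N pref rest

-- the step only adds to the accumulator
theorem solveAltStep_add (cs : List Char) (N : Int) (pref : List (PySem.Dict Char Int))
    (a : Int) (pr : Int × Option Int) :
    solveAltStep cs N pref a pr = a + solveAltStep cs N pref 0 pr := by
  obtain ⟨i, nxt⟩ := pr
  simp only [solveAltStep]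
  cases PySem.List.pyGet? cs i with
  | none => simp
  | some c => cases nxt <;> simp

-- Source B's zip/foldl loop computes solveAltSum
theorem solveAlt_fold_eq_sum (cs : List Char) (N : Int) (pref : List (PySem.Dict Char Int)) :
    ∀ (l : List Int) (a : Int),
      (l.zip ((l.drop 1).map Option.some ++ [Option.none])).foldl (solveAltStep cs N pref) a
        = a + solveAltSum cs N pref l := by
  intro l
  induction l with
  | nil => intro a; simp [solveAltSum]
  | cons i rest ih =>
    intro a
    cases rest with
    | nil =>
      simp only [List.drop, List.map, List.nil_append, List.zip, List.zipWith, List.foldl,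
        solveAltSum, List.head?]
      rw [solveAltStep_add]
      ring
    | cons j r2 =>
      simp only [List.drop, List.map, List.cons_append, List.zip, List.zipWith, List.foldl]
      have := ih (solveAltStep cs N pref a (i, some j))
      simp only [List.zip, List.drop] at this
      rw [this, solveAltStep_add]
      simp only [solveAltSum, List.head?_cons]
      ring

-- prefix-table scan, recursively
def prefScan (cur : PySem.Dict Char Int) : List Char → List (PySem.Dict Char Int)
  | [] => []
  | ch :: rest =>
    let cur' := cur.insert ch (cur.getD ch 0 + 1)
    cur' :: prefScan cur' rest

def prefLast (cur : PySem.Dict Char Int) : List Char → PySem.Dict Char Int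
  | [] => cur
  | ch :: rest => prefLast (cur.insert ch (cur.getD ch 0 + 1)) rest

theorem solveAltPref_fold (cs : List Char) :
    ∀ (acc : List (PySem.Dict Char Int)) (cur : PySem.Dict Char Int),
      cs.foldl solveAltPrefStep (acc, cur) = (acc ++ prefScan cur cs, prefLast cur cs) := by
  induction cs with
  | nil => intro acc cur; simp [prefScan, prefLast]
  | cons ch rest ih =>
    intro acc cur
    simp only [List.foldl, solveAltPrefStep, prefScan, prefLast, ih, List.append_assoc,
      List.singleton_append]

theorem solveAltPref_eq (cs : List Char) :
    solveAltPref cs = PySem.Dict.empty :: prefScan PySem.Dict.empty cs := by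
  simp [solveAltPref, solveAltPref_fold]

theorem length_prefScan (cur : PySem.Dict Char Int) (cs : List Char) :
    (prefScan cur cs).length = cs.length := by
  induction cs generalizing cur with
  | nil => rfl
  | cons ch rest ih => simp [prefScan, ih]

theorem prefScan_getD (cs : List Char) :
    ∀ (cur : PySem.Dict Char Int) (k : Nat) (c : Char), k < cs.length →
      ((prefScan cur cs).getD k PySem.Dict.empty).getD c 0
        = cur.getD c 0 + (PySem.List.count (cs.take (k + 1)) c : Int) := by
  induction cs with
  | nil => intro _ k _ h; simp at h
  | cons ch rest ih =>
    intro cur k c h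
    have hstep : (cur.insert ch (cur.getD ch 0 + 1)).getD c 0
        = cur.getD c 0 + (PySem.List.count [ch] c : Int) := by
      rw [PySem.Dict.getD_insert]
      by_cases hc : c = ch
      · subst hc; simp [PySem.List.count]
      · simp [hc, PySem.List.count, (Ne.symm hc)]
    cases k with
    | zero =>
      simpa [prefScan] using hstep
    | succ k =>
      have hk : k < rest.length := by simpa using h
      have := ih (cur.insert ch (cur.getD ch 0 + 1)) k c hk
      simp only [prefScan, List.getD, List.getElem?_cons_succ] at *
      rw [this, hstep]
      have : PySem.List.count (ch :: rest.take (k + 1)) c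
          = PySem.List.count [ch] c + PySem.List.count (rest.take (k + 1)) c := by
        simp [PySem.List.count, List.count_cons]; omega
      simp only [List.take]
      push_cast [this]
      ring

-- the table row m holds the counts of S[:m]
theorem pref_lookup (cs : List Char) (m : Int) (c : Char) (h0 : 0 ≤ m)
    (hm : m ≤ (cs.length : Int)) :
    ((PySem.List.pyGet? (solveAltPref cs) m).getD PySem.Dict.empty).getD c 0
      = (PySem.List.count (cs.take m.toNat) c : Int) := by
  rw [solveAltPref_eq, PySem.List.pyGet?_of_nonneg _ h0]
  cases hk : m.toNat with
  | zero => simp [PySem.List.count]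
  | succ k =>
    have hklt : k < cs.length := by omega
    have hlen : (prefScan PySem.Dict.empty cs).length = cs.length := length_prefScan _ _
    rw [List.getElem?_cons_succ,
      List.getElem?_eq_getElem (h := by rw [hlen]; exact hklt)]
    simp only [Option.getD_some]
    have hgd := prefScan_getD cs PySem.Dict.empty k c hklt
    rw [List.getD_eq_getElem _ _ (by rw [hlen]; exact hklt)] at hgd
    rw [hgd]
    have : (PySem.Dict.empty : PySem.Dict Char Int).getD c 0 = 0 := by rfl
    rw [this]
    ring

-- A's slice-and-count term equals B's table arithmetic, for any window end 0 ≤ pt ≤ len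
theorem window_eq (cs : List Char) (i pt : Int) (c : Char) (hi : 0 ≤ i)
    (hpt0 : 0 ≤ pt) (hpt : pt ≤ (cs.length : Int)) :
    ((PySem.List.slice cs (some (i + 2)) (some pt)).length : Int)
      - (PySem.List.count (PySem.List.slice cs (some (i + 2)) (some pt)) c : Int)
    = if i + 2 < pt then
        (pt - (i + 2)) - ((PySem.List.count (cs.take pt.toNat) c : Int)
          - (PySem.List.count (cs.take (i + 2).toNat) c : Int))
      else 0 := by
  rw [PySem.List.slice_toNat cs (by omega) hpt0]
  by_cases hlt : i + 2 < pt
  · have hsplit : cs.take pt.toNat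
        = cs.take (i + 2).toNat ++ (cs.drop (i + 2).toNat).take (pt.toNat - (i + 2).toNat) := by
      rw [← List.take_add]
      congr 1
      omega
    have hcnt : PySem.List.count (cs.take pt.toNat) c
        = PySem.List.count (cs.take (i + 2).toNat) c
          + PySem.List.count ((cs.drop (i + 2).toNat).take (pt.toNat - (i + 2).toNat)) c := by
      rw [hsplit]; simp [PySem.List.count]
    have hlen : ((cs.drop (i + 2).toNat).take (pt.toNat - (i + 2).toNat)).length
        = pt.toNat - (i + 2).toNat := by
      simp; omega
    simp only [hlt, if_true, hlen, hcnt]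
    push_cast
    omega
  · have : pt.toNat - (i + 2).toNat = 0 := by omega
    simp [this, hlt, PySem.List.count]

-- A's reversed stateful loop over a list of in-range hit indices, characterised:
-- result = (sum of B's per-hit terms, first hit's char, first hit's index)
theorem foldrA_eq (cs : List Char) (N : Int) (hN : N ≤ (cs.length : Int)) :
    ∀ (l : List Int),
      (∀ i ∈ l, 0 ≤ i ∧ i < N - 2 ∧ solveAltHit cs i = true) →
      l.foldr (fun i st => solveStepA cs N st i) (0, none, N)
        = (solveAltSum cs N (solveAltPref cs) l,
           (match l.head? with | none => none | some h => PySem.List.pyGet? cs h),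
           (l.head?).getD N) := by
  intro l
  induction l with
  | nil => intro _; simp [solveAltSum]
  | cons i rest ih =>
    intro h
    obtain ⟨hi0, hiN, hhit⟩ := h i (by simp)
    have hrest : ∀ j ∈ rest, 0 ≤ j ∧ j < N - 2 ∧ solveAltHit cs j = true :=
      fun j hj => h j (List.mem_cons_of_mem _ hj)
    obtain ⟨c, hci, hci1⟩ :
        ∃ c, PySem.List.pyGet? cs i = some c ∧ PySem.List.pyGet? cs (i + 1) = some c := by
      cases h1 : PySem.List.pyGet? cs i with
      | none => simp [solveAltHit, h1] at hhit
      | some c =>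
        cases h2 : PySem.List.pyGet? cs (i + 1) with
        | none => simp [solveAltHit, h1, h2] at hhit
        | some c2 =>
          simp only [solveAltHit, h1, h2, decide_eq_true_eq] at hhit
          exact ⟨c, rfl, by rw [hhit]⟩
    rw [List.foldr_cons, ih hrest]
    have sum_cons : ∀ (x : Int) (xs : List Int),
        solveAltSum cs N (solveAltPref cs) (x :: xs)
          = solveAltStep cs N (solveAltPref cs) 0 (x, xs.head?)
            + solveAltSum cs N (solveAltPref cs) xs := fun _ _ => rfl
    have hi2len : i + 2 ≤ (cs.length : Int) := by omega
    cases hrh : rest with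
    | nil =>
      have hsum0 : solveAltSum cs N (solveAltPref cs) ([] : List Int) = 0 := rfl
      simp only [solveStepA, hci, hci1, if_true, ne_eq, reduceCtorEq, not_false_eq_true,
        List.head?_cons, List.head?_nil, Option.getD_none, Option.getD_some,
        Prod.mk.injEq, and_true]
      rw [sum_cons, hsum0]
      simp only [solveAltStep, hci, List.head?_nil]
      rw [window_eq cs i N c hi0 (by omega) hN,
        pref_lookup cs N c (by omega) hN,
        pref_lookup cs (i + 2) c (by omega) hi2len]
      split_ifs <;> omega
    | cons j r2 =>
      obtain ⟨hj0, hjN, hhitj⟩ := hrest j (by simp [hrh])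
      obtain ⟨cj, hcj, -⟩ :
          ∃ cj, PySem.List.pyGet? cs j = some cj ∧ PySem.List.pyGet? cs (j + 1) = some cj := by
        cases h1 : PySem.List.pyGet? cs j with
        | none => simp [solveAltHit, h1] at hhitj
        | some cjj =>
          cases h2 : PySem.List.pyGet? cs (j + 1) with
          | none => simp [solveAltHit, h1, h2] at hhitj
          | some cj2 =>
            simp only [solveAltHit, h1, h2, decide_eq_true_eq] at hhitj
            exact ⟨cjj, rfl, by rw [hhitj]⟩
      have hjlen : j ≤ (cs.length : Int) := by omega
      simp only [solveStepA, hci, hci1, if_true, List.head?_cons, Option.getD_some, hcj,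
        Prod.mk.injEq, and_true]
      conv_rhs => rw [sum_cons]
      simp only [List.head?_cons, solveAltStep, hci, hcj]
      rw [window_eq cs i j c hi0 hj0 hjlen,
        pref_lookup cs j c hj0 hjlen,
        pref_lookup cs (i + 2) c (by omega) hi2len]
      simp only [ne_eq, Option.some.injEq]
      by_cases hcc : c = cj
      · simp only [hcc, not_true_eq_false, if_false]
        split_ifs <;> omega
      · simp only [hcc, Ne.symm hcc, not_false_eq_true, if_true]
        split_ifs <;> omega

theorem stepA_not_hit (cs : List Char) (N : Int) (st : Int × Option Char × Int) (i : Int)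
    (h : solveAltHit cs i = false) : solveStepA cs N st i = st := by
  obtain ⟨ans, alf, pt⟩ := st
  cases h1 : PySem.List.pyGet? cs i with
  | none => simp [solveStepA, h1]
  | some c =>
    cases h2 : PySem.List.pyGet? cs (i + 1) with
    | none => simp [solveStepA, h1, h2]
    | some c2 =>
      simp only [solveAltHit, h1, h2, decide_eq_false_iff_not] at h
      simp [solveStepA, h1, h2, h]

theorem solveA_filter (cs : List Char) (N : Int) :
    ((PySem.List.pyRange 0 (N - 2) 1).reverse).foldl (solveStepA cs N) (0, none, N)
      = (((PySem.List.pyRange 0 (N - 2) 1).filter (solveAltHit cs)).reverse).foldl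
          (solveStepA cs N) (0, none, N) := by
  rw [← List.filter_reverse, List.foldl_filter]
  refine PySem.List.foldl_congr_mem _ _ _ _ ?_
  intro st i _
  by_cases h : solveAltHit cs i
  · simp [h]
  · simp only [h, if_false, Bool.false_eq_true]
    exact stepA_not_hit cs N st i (by simpa using h)

-- ===== VERDICT (by name: the statement is the Claim_ definition above) =====
theorem solve_spec : Claim_equal_solve := by
  intro S N _ hP
  unfold Spec_solve solve solve_alt
  rcases (by omega : N ≤ 2 ∨ 2 < N) with hN2 | hN2
  · have hnil : PySem.List.pyRange 0 (N - 2) 1 = [] :=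
      PySem.List.pyRange_one_eq_nil (by omega)
    simp [hnil]
  · have hNlen : N ≤ (S.toList.length : Int) := by
      cases hP with
      | inl h => exact h
      | inr h => omega
    rw [solveA_filter, List.foldl_reverse]
    have hmem : ∀ i ∈ (PySem.List.pyRange 0 (N - 2) 1).filter (solveAltHit S.toList),
        0 ≤ i ∧ i < N - 2 ∧ solveAltHit S.toList i = true := by
      intro i hi
      rw [List.mem_filter] at hi
      obtain ⟨hr, hh⟩ := hi
      rw [PySem.List.mem_pyRange_one] at hr
      exact ⟨hr.1, hr.2, hh⟩
    rw [foldrA_eq S.toList N hNlen _ hmem]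
    simp only
    rw [solveAlt_fold_eq_sum]
    ring
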